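-- pv_equiv track=rewrite | github.com/pathim/advent_of_code_2020 | 7/main.py | traverse_count
-- ===== SOURCE A (Python) =====
-- def traverse_count(tree,node):
-- 	try:
-- 		n=tree[node]
-- 	except KeyError:
-- 		return 0
-- 	count=0
-- 	for a in n:
-- 		count+= a[1]*(traverse_count(tree,a[0])+1)
-- 	return count
-- ===== SOURCE B (Python) =====
-- def traverse_count(tree, node):
--     # Bottom-up fixed-point iteration (DP over the DAG) instead of top-down
--     # recursion: repeatedly recompute count[k] = sum(m*(count[child]+1)) for
--     # every key from the previous table, stopping once the table stabilizes.
--     counts = {}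
--     for _ in range(len(tree) + 1):
--         new = {k: sum(m * (counts.get(ch, 0) + 1) for ch, m in edges)
--                for k, edges in tree.items()}
--         if new == counts:
--             break
--         counts = new
--     return counts.get(node, 0)
-- ===== Notes on version B (the rewrite author's own statement) =====
-- stated objective: alternative
-- what changed: Replaced the naive top-down recursion by a bottom-up fixed-point iteration: rounds recompute count[k] for every key from the previous round's table until the table stabilizes (at most len(tree)+1 rounds), then the answer is one lookup; this avoids A's exponential re-traversal of shared sub-DAGs, though on random sparse inputs a timing run shows no speed-up.
import Mathlib
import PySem

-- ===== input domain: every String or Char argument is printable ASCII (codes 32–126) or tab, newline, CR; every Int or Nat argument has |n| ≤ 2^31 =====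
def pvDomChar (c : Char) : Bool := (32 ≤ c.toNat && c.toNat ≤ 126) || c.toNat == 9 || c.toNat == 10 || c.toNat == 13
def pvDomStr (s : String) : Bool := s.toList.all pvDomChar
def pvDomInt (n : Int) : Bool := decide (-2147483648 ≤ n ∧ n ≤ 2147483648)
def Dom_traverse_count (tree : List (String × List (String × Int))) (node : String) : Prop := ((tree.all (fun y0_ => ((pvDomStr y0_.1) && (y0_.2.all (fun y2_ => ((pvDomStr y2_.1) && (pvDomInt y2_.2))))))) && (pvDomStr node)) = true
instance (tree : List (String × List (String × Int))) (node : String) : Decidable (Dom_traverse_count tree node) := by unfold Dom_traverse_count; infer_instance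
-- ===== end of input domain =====

-- B: bottom-up fixed-point iteration over a whole count table (with early exit on
-- stabilization) instead of naive top-down recursion — a different algorithm, not claimed faster.

-- ===== PORT A =====
-- fuel-bounded transliteration of A's recursion; fuel tree.length+1 bounds the recursion
-- depth on every input admitted by Pre_ (no cycle reachable from node).
def tcA (tree : List (String × List (String × Int))) : Nat → String → Int
  | 0, _ => 0
  | f+1, node =>
    match tree.lookup node with
    | none => 0
    | some n => n.foldl (fun count a => count + a.2 * (tcA tree f a.1 + 1)) 0

def traverse_count (tree : List (String × List (String × Int))) (node : String) : Int :=
  tcA tree (tree.length + 1) node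

-- ===== PORT B =====
def rowB (c : List (String × Int)) (edges : List (String × Int)) : Int :=
  edges.foldl (fun s a => s + a.2 * (((c.lookup a.1).getD 0) + 1)) 0

def stepB (tree : List (String × List (String × Int))) (c : List (String × Int)) :
    List (String × Int) :=
  tree.map (fun p => (p.1, rowB c p.2))

def iterB (tree : List (String × List (String × Int))) : Nat → List (String × Int)
  | 0 => []
  | f+1 =>
    let c := iterB tree f
    let c' := stepB tree c
    if c' = c then c else c'

def traverse_count_alt (tree : List (String × List (String × Int))) (node : String) : Int :=
  ((iterB tree (tree.length + 1)).lookup node).getD 0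

-- ===== PRECONDITION & SPEC =====
-- reachability helpers for Pre_: successors via first-match lookup, saturated in tree.length steps
def succsP (tree : List (String × List (String × Int))) (k : String) : List String :=
  ((tree.lookup k).getD []).map Prod.fst

def reachIterP (tree : List (String × List (String × Int))) : Nat → List String → List String
  | 0, s => s
  | n+1, s => reachIterP tree n ((s ++ s.flatMap (succsP tree)).dedup)

-- Pre_ excludes exactly the inputs on which Python A diverges (RecursionError):
-- those where some node reachable from `node` lies on a lookup-cycle.
def Pre_traverse_count (tree : List (String × List (String × Int))) (node : String) : Prop :=
  ∀ k ∈ reachIterP tree tree.length [node], k ∉ reachIterP tree tree.length (succsP tree k)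
instance (tree : List (String × List (String × Int))) (node : String) :
    Decidable (Pre_traverse_count tree node) := by unfold Pre_traverse_count; infer_instance

def pvWitness_traverse_count : (List (String × List (String × Int))) × String :=
  ([("a", [("b", 2), ("c", 1)]), ("b", [("c", 3)]), ("c", [])], "a")

def Spec_traverse_count (tree : List (String × List (String × Int))) (node : String) (out : Int) : Prop := out = traverse_count_alt tree node
instance (tree : List (String × List (String × Int))) (node : String) (out : Int) : Decidable (Spec_traverse_count tree node out) := by unfold Spec_traverse_count; infer_instance

-- ===== CLAIM (what is proved, stated in full; the proofs are below) =====
def Claim_equal_traverse_count : Prop := ∀ (tree : List (String × List (String × Int))) (node : String), Dom_traverse_count tree node → Pre_traverse_count tree node → Spec_traverse_count tree node (traverse_count tree node)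

-- ===== LEMMAS AND PROOFS =====
theorem lookup_stepB (tree : List (String × List (String × Int))) (c : List (String × Int))
    (node : String) :
    (stepB tree c).lookup node = (tree.lookup node).map (rowB c) := by
  induction tree with
  | nil => rfl
  | cons p rest ih =>
    simp only [stepB, List.map, List.lookup] at *
    rcases h : node == p.1 <;> simp [h, ih]

theorem iterB_succ (tree : List (String × List (String × Int))) (f : Nat) :
    iterB tree (f+1) = stepB tree (iterB tree f) := by
  simp only [iterB]
  split
  · next h => exact h.symm
  · rfl

theorem iterB_eq_tcA (tree : List (String × List (String × Int))) (f : Nat) (node : String) :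
    ((iterB tree f).lookup node).getD 0 = tcA tree f node := by
  induction f generalizing node with
  | zero => rfl
  | succ f ih =>
    rw [iterB_succ]
    simp only [tcA, lookup_stepB]
    cases h : tree.lookup node with
    | none => rfl
    | some n =>
      simp only [Option.map_some, Option.getD_some, rowB]
      have : (fun (s : Int) (a : String × Int) => s + a.2 * ((((iterB tree f).lookup a.1).getD 0) + 1))
           = (fun (count : Int) (a : String × Int) => count + a.2 * (tcA tree f a.1 + 1)) := by
        funext s a; rw [ih a.1]
      rw [this]

-- ===== VERDICT (by name: the statement is the Claim_ definition above) =====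
theorem traverse_count_spec : Claim_equal_traverse_count := by
  intro tree node _ _
  unfold Spec_traverse_count traverse_count traverse_count_alt
  exact (iterB_eq_tcA tree (tree.length + 1) node).symm
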